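-- pv_equiv track=rewrite | github.com/jjonhwa/Coding_Test | 백준/solve/[14890]_경사로.py | install_slope
-- ===== SOURCE A (Python) =====
-- def install_slope(road, L):
--     """ 경사로를 설치하면서 지나갈 수 있는가? """
--
--     idx, length = 0, 1
--     while idx < len(road)-1:
--
--         # 높이가 2이상 차이난다면 지나갈 수 없는 길
--         if abs(road[idx] - road[idx+1]) > 1:
--             return False
--
--         # 높이가 같다면, idx, length를 높여주고 continue
--         if road[idx] == road[idx+1]:
--             idx += 1
--             length += 1
--
--         # 다음 칸이 현재 칸보다 1칸 높다면 => 앞에 경사로 설치 가능한지 판단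
--         elif road[idx] == road[idx+1] - 1:
--             if length >= L:
--                 length = 1
--                 idx += 1 # 올라갔을 떄는 올라간 다음 위치로 지정
--             else:
--                 return False
--
--         # 다음 칸이 현재 칸보다 1칸 낮다면 => 이후에 경사로 설치가 가능한지 판단
--         else:
--             # 길이 초기화 및 idx를 다음 칸으로 이동
--             length = 1
--             idx += 1
--
--             # 경사로의 가로 길이만큼 이동 가능한지 판단
--             while True:
--                 if length == L: # 설치 했다! break
--                     length = 0 # 내려갔을 때는 idx를 내려온 위치로 지정
--                     break
--                 elif idx >= len(road)-1: # 설치 못했는데 길이 넘어갔다! => False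
--                     return False
--
--                 if road[idx] == road[idx + 1]:
--                     idx += 1
--                     length += 1
--                 else:
--                     return False
--
--     return True
-- ===== SOURCE B (Python) =====
-- def install_slope(road, L):
--     n = len(road)
--     used = [False] * n
--     for i in range(n - 1):
--         if abs(road[i] - road[i + 1]) > 1:
--             return False
--         if road[i] < road[i + 1]:
--             for j in range(i, i - L, -1):
--                 if j < 0 or j >= n or used[j] or road[j] != road[i]:
--                     return False
--                 used[j] = True
--         elif road[i] > road[i + 1]:
--             for j in range(i + 1, i + L + 1):
--                 if j < 0 or j >= n or used[j] or road[j] != road[i + 1]: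
--                     return False
--                 used[j] = True
--     return True
-- ===== Notes on version B (the rewrite author's own statement) =====
-- stated objective: idiomatic
-- what changed: Replaced A's jumping index with run-length counter and nested walk-ahead loop by the canonical BOJ-14890 solution: a used[] boolean array plus a single fixed sweep over adjacent pairs that scans and marks the L ramp cells at each ascent/descent.
-- outside the precondition, e.g. on install_slope([1, 0], 0): A returns False, B returns True
import Mathlib
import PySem

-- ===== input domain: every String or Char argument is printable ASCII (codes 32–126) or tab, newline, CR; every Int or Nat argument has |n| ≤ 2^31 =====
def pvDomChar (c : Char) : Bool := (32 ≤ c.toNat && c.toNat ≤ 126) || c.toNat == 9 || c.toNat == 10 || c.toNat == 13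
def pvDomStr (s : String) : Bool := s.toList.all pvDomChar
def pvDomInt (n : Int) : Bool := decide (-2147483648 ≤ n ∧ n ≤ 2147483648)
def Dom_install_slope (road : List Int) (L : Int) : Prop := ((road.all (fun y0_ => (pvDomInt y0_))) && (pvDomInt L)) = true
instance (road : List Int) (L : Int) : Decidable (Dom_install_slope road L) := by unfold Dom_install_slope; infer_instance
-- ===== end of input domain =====

-- B replaces A's jumping index + run-length counter by the canonical used[]-array sweep over adjacent pairs (idiomatic for BOJ 14890); equal return values proved for every road and ramp length L ≥ 1.

-- ===== PORT A =====
-- inner `while True` ramp walk of A: returns the idx reached at `break`, none at `return False`.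
-- fuel only makes the recursion structural; road.length + 1 unfoldings always suffice, since every
-- iteration increments idx and the walk stops once idx ≥ len(road) - 1.
-- road.getD is only evaluated under guards that keep the index in range, where Python's road[idx] cannot raise.
def aInner (road : List Int) (L : Int) : Nat → Nat → Int → Option Nat
  | 0, _, _ => none
  | fuel + 1, idx, len =>
    if len = L then some idx
    else if (idx : Int) ≥ (road.length : Int) - 1 then none
    else if road.getD idx 0 = road.getD (idx + 1) 0 then aInner road L fuel (idx + 1) (len + 1)
    else none

-- outer while loop of A, state (idx, length); fuel as above (idx strictly increases each iteration)
def aLoop (road : List Int) (L : Int) : Nat → Nat → Int → Bool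
  | 0, _, _ => true
  | fuel + 1, idx, len =>
    if (idx : Int) < (road.length : Int) - 1 then
      if (road.getD idx 0 - road.getD (idx + 1) 0).natAbs > 1 then false
      else if road.getD idx 0 = road.getD (idx + 1) 0 then aLoop road L fuel (idx + 1) (len + 1)
      else if road.getD idx 0 = road.getD (idx + 1) 0 - 1 then
        (if len ≥ L then aLoop road L fuel (idx + 1) 1 else false)
      else
        match aInner road L (road.length + 1) (idx + 1) 1 with
        | some idx' => aLoop road L fuel idx' 0
        | none => false
    else true

def install_slope (road : List Int) (L : Int) : Bool := aLoop road L (road.length + 1) 0 1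

-- ===== PORT B =====
-- one ramp scan of Source B (`for j in range(start, stop, step)` with |step| = 1 and max(L,0) iterations,
-- checking in-bounds, unused and height t, marking cells used); k counts the remaining iterations.
def bScan (road : List Int) (used : List Bool) (t : Int) (j step : Int) : Nat → Option (List Bool)
  | 0 => some used
  | Nat.succ k =>
    if j < 0 ∨ (road.length : Int) ≤ j ∨ used.getD j.toNat false = true ∨ road.getD j.toNat 0 ≠ t
    then none
    else bScan road (used.set j.toNat true) t (j + step) step k

-- Source B's `for i in range(n-1)` sweep over adjacent pairs; fuel (road.length + 1 at the call,
-- one unit per loop iteration) only makes the recursion structural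
def bLoop (road : List Int) (L : Int) : Nat → List Bool → Nat → Bool
  | 0, _, _ => true
  | fuel + 1, used, i =>
    if i + 1 < road.length then
      if (road.getD i 0 - road.getD (i + 1) 0).natAbs > 1 then false
      else if road.getD i 0 < road.getD (i + 1) 0 then
        match bScan road used (road.getD i 0) (i : Int) (-1) L.toNat with
        | none => false
        | some u => bLoop road L fuel u (i + 1)
      else if road.getD (i + 1) 0 < road.getD i 0 then
        match bScan road used (road.getD (i + 1) 0) ((i : Int) + 1) 1 L.toNat with
        | none => false
        | some u => bLoop road L fuel u (i + 1)
      else bLoop road L fuel used (i + 1)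
    else true

def install_slope_alt (road : List Int) (L : Int) : Bool :=
  bLoop road L (road.length + 1) (List.replicate road.length false) 0

-- ===== PRECONDITION & SPEC =====
-- Pre_ restricts to the problem's natural domain, a positive ramp length L (BOJ 14890 guarantees 1 ≤ L):
-- for L ≤ 0 the ramp length is meaningless and A's inner walk can never complete, so A rejects every descent.
def Pre_install_slope (road : List Int) (L : Int) : Prop := 1 ≤ L
instance (road : List Int) (L : Int) : Decidable (Pre_install_slope road L) := by unfold Pre_install_slope; infer_instance
def pvWitness_install_slope : List Int × Int := ([0, 0, 1], 2)

def Spec_install_slope (road : List Int) (L : Int) (out : Bool) : Prop := out = install_slope_alt road L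
instance (road : List Int) (L : Int) (out : Bool) : Decidable (Spec_install_slope road L out) := by unfold Spec_install_slope; infer_instance

-- ===== CLAIM (what is proved, stated in full; the proofs are below) =====
def Claim_equal_install_slope : Prop := ∀ (road : List Int) (L : Int), Dom_install_slope road L → Pre_install_slope road L → Spec_install_slope road L (install_slope road L)

-- ===== LEMMAS AND PROOFS =====

theorem getD_set_self (u : List Bool) (i : Nat) (h : i < u.length) :
    (u.set i true).getD i false = true := by
  simp [List.getD_eq_getElem?_getD, h]

theorem getD_set_ne (u : List Bool) (i m : Nat) (h : i ≠ m) :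
    (u.set i true).getD m false = u.getD m false := by
  simp [List.getD_eq_getElem?_getD, List.getElem?_set_ne h]

theorem getD_replicate (n j : Nat) : (List.replicate n false).getD j false = false := by
  simp [List.getD_eq_getElem?_getD]

-- characterisation of A's inner ramp walk: with l = L - r it walks r equal steps forward
theorem aInner_spec (road : List Int) (L : Int) :
    ∀ (r i : Nat) (l : Int) (fuel : Nat), l = L - r →
    min r (road.length - 1 - i) < fuel →
    aInner road L fuel i l =
      if (∀ s : Nat, s < r → ((i + s : Int) < (road.length : Int) - 1 ∧
            road.getD (i + s) 0 = road.getD (i + s + 1) 0))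
      then some (i + r) else none := by
  intro r
  induction r with
  | zero =>
    intro i l fuel hl hf
    match fuel with
    | 0 => omega
    | fuel + 1 =>
      rw [aInner]
      simp at hl
      simp [hl]
  | succ r ih =>
    intro i l fuel hl hf
    match fuel with
    | 0 => omega
    | fuel + 1 =>
      rw [aInner]
      have hne : ¬ (l = L) := by omega
      rw [if_neg hne]
      by_cases hb : (i : Int) ≥ (road.length : Int) - 1
      · rw [if_pos hb, if_neg]
        intro hall
        have := (hall 0 (by omega)).1
        push_cast at this
        omega
      · rw [if_neg hb]
        by_cases he : road.getD i 0 = road.getD (i + 1) 0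
        · rw [if_pos he,
            ih (i + 1) (l + 1) fuel (by push_cast; push_cast at hl; omega) (by push_cast at hb; omega)]
          push_cast
          have hiff : (∀ s : Nat, s < r → ((i + 1 + s : Int) < (road.length : Int) - 1 ∧
                road.getD (i + 1 + s) 0 = road.getD (i + 1 + s + 1) 0)) ↔
              (∀ s : Nat, s < r + 1 → ((i + s : Int) < (road.length : Int) - 1 ∧
                road.getD (i + s) 0 = road.getD (i + s + 1) 0)) := by
            constructor
            · intro h s hs
              match s with
              | 0 => simpa using ⟨by omega, he⟩
              | s + 1 =>
                have := h s (by omega)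
                have e1 : i + 1 + s = i + (s + 1) := by omega
                rw [e1] at this
                push_cast at this ⊢
                constructor
                · omega
                · exact this.2
            · intro h s hs
              have := h (s + 1) (by omega)
              have e1 : i + (s + 1) = i + 1 + s := by omega
              rw [e1] at this
              push_cast at this ⊢
              exact ⟨by omega, this.2⟩
          rw [if_congr hiff rfl rfl]
          have e2 : i + 1 + r = i + (r + 1) := by omega
          rw [e2]
        · rw [if_neg he, if_neg]
          intro hall
          exact he (by simpa using (hall 0 (by omega)).2)

-- condition for one cell of a descending scan to pass
def Qd (road : List Int) (u : List Bool) (t j : Int) (s : Nat) : Prop :=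
  0 ≤ j - s ∧ j - s < (road.length : Int) ∧ u.getD (j - s).toNat false = false ∧
    road.getD (j - s).toNat 0 = t

-- condition for one cell of an ascending scan to pass
def Qu (road : List Int) (u : List Bool) (t j : Int) (s : Nat) : Prop :=
  0 ≤ j + s ∧ j + s < (road.length : Int) ∧ u.getD (j + s).toNat false = false ∧
    road.getD (j + s).toNat 0 = t

theorem bScan_down_some (road : List Int) (t : Int) :
    ∀ (k : Nat) (u : List Bool) (j : Int), u.length = road.length →
    (∀ s : Nat, s < k → Qd road u t j s) →
    ∃ u', bScan road u t j (-1) k = some u' ∧ u'.length = u.length ∧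
      ∀ m : Nat, u'.getD m false = (decide (j - k < (m : Int) ∧ (m : Int) ≤ j) || u.getD m false) := by
  intro k
  induction k with
  | zero =>
    intro u j _ _
    refine ⟨u, rfl, rfl, fun m => ?_⟩
    have h : ¬ (j - ((0:Nat):Int) < (m : Int) ∧ (m : Int) ≤ j) := by push_cast; omega
    simp [h]
  | succ k ih =>
    intro u j hlen hall
    have h0 := hall 0 (by omega)
    unfold Qd at h0
    push_cast at h0
    simp only [sub_zero] at h0
    obtain ⟨h1, h2, h3, h4⟩ := h0
    rw [bScan]
    rw [if_neg (by push_neg; exact ⟨by omega, by omega, by rw [h3]; exact Bool.false_ne_true, h4⟩)]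
    have hstep : ∀ s : Nat, s < k → Qd road (u.set j.toNat true) t (j + -1) s := by
      intro s hs
      have hq := hall (s + 1) (by omega)
      unfold Qd at hq ⊢
      obtain ⟨q1, q2, q3, q4⟩ := hq
      have e1 : j + -1 - (s : Int) = j - ((s + 1 : Nat) : Int) := by push_cast; ring
      rw [e1]
      refine ⟨q1, q2, ?_, q4⟩
      rw [getD_set_ne u j.toNat ((j - ((s + 1 : Nat) : Int)).toNat) (by omega)]
      exact q3
    obtain ⟨u', he, hl, hm⟩ := ih (u.set j.toNat true) (j + -1) (by simpa using hlen) hstep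
    refine ⟨u', he, by simpa using hl, fun m => ?_⟩
    rw [hm m]
    by_cases hmj : m = j.toNat
    · subst hmj
      rw [getD_set_self u _ (by rw [hlen]; omega)]
      have hP : j - (((k + 1 : Nat)) : Int) < ((j.toNat : Nat) : Int) ∧ ((j.toNat : Nat) : Int) ≤ j := by
        push_cast; omega
      simp only [Bool.or_true, decide_eq_true hP, Bool.true_or]
    · rw [getD_set_ne u j.toNat m (Ne.symm hmj)]
      congr 1
      rw [decide_eq_decide]
      have hne : ((m : Int)) ≠ j := by omega
      push_cast
      omega

theorem bScan_down_none (road : List Int) (t : Int) :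
    ∀ (k : Nat) (u : List Bool) (j : Int),
    ¬ (∀ s : Nat, s < k → Qd road u t j s) →
    bScan road u t j (-1) k = none := by
  intro k
  induction k with
  | zero => intro u j h; exact absurd (fun s hs => absurd hs (by omega)) h
  | succ k ih =>
    intro u j h
    rw [bScan]
    by_cases h0 : Qd road u t j 0
    · have h0' := h0
      unfold Qd at h0'
      push_cast at h0'
      simp only [sub_zero] at h0'
      obtain ⟨h1, h2, h3, h4⟩ := h0'
      rw [if_neg (by push_neg; exact ⟨by omega, by omega, by rw [h3]; exact Bool.false_ne_true, h4⟩)]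
      apply ih
      intro hc
      apply h
      intro s hs
      match s with
      | 0 => exact h0
      | s + 1 =>
        have hq := hc s (by omega)
        unfold Qd at hq ⊢
        have e1 : j + -1 - (s : Int) = j - ((s + 1 : Nat) : Int) := by push_cast; ring
        rw [e1] at hq
        obtain ⟨q1, q2, q3, q4⟩ := hq
        rw [getD_set_ne u j.toNat ((j - ((s + 1 : Nat) : Int)).toNat) (by omega)] at q3
        exact ⟨q1, q2, q3, q4⟩
    · rw [if_pos]
      by_cases c1 : j < 0
      · exact Or.inl c1
      · by_cases c2 : (road.length : Int) ≤ j
        · exact Or.inr (Or.inl c2)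
        · by_cases c3 : u.getD j.toNat false = true
          · exact Or.inr (Or.inr (Or.inl c3))
          · refine Or.inr (Or.inr (Or.inr ?_))
            intro hc
            apply h0
            unfold Qd
            push_cast
            simp only [sub_zero]
            exact ⟨by omega, by omega, by simpa using c3, hc⟩

theorem bScan_up_some (road : List Int) (t : Int) :
    ∀ (k : Nat) (u : List Bool) (j : Int), u.length = road.length →
    (∀ s : Nat, s < k → Qu road u t j s) →
    ∃ u', bScan road u t j 1 k = some u' ∧ u'.length = u.length ∧
      ∀ m : Nat, u'.getD m false = (decide (j ≤ (m : Int) ∧ (m : Int) < j + k) || u.getD m false) := by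
  intro k
  induction k with
  | zero =>
    intro u j _ _
    refine ⟨u, rfl, rfl, fun m => ?_⟩
    have h : ¬ (j ≤ (m : Int) ∧ (m : Int) < j + ((0:Nat):Int)) := by push_cast; omega
    simp [h]
  | succ k ih =>
    intro u j hlen hall
    have h0 := hall 0 (by omega)
    unfold Qu at h0
    push_cast at h0
    simp only [add_zero] at h0
    obtain ⟨h1, h2, h3, h4⟩ := h0
    rw [bScan]
    rw [if_neg (by push_neg; exact ⟨by omega, by omega, by rw [h3]; exact Bool.false_ne_true, h4⟩)]
    have hstep : ∀ s : Nat, s < k → Qu road (u.set j.toNat true) t (j + 1) s := by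
      intro s hs
      have hq := hall (s + 1) (by omega)
      unfold Qu at hq ⊢
      obtain ⟨q1, q2, q3, q4⟩ := hq
      have e1 : j + 1 + (s : Int) = j + ((s + 1 : Nat) : Int) := by push_cast; ring
      rw [e1]
      refine ⟨q1, q2, ?_, q4⟩
      rw [getD_set_ne u j.toNat ((j + ((s + 1 : Nat) : Int)).toNat) (by omega)]
      exact q3
    obtain ⟨u', he, hl, hm⟩ := ih (u.set j.toNat true) (j + 1) (by simpa using hlen) hstep
    refine ⟨u', he, by simpa using hl, fun m => ?_⟩
    rw [hm m]
    by_cases hmj : m = j.toNat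
    · subst hmj
      rw [getD_set_self u _ (by rw [hlen]; omega)]
      have hP : j ≤ ((j.toNat : Nat) : Int) ∧ ((j.toNat : Nat) : Int) < j + (((k + 1 : Nat)) : Int) := by
        push_cast; omega
      simp only [Bool.or_true, decide_eq_true hP, Bool.true_or]
    · rw [getD_set_ne u j.toNat m (Ne.symm hmj)]
      congr 1
      rw [decide_eq_decide]
      have hne : ((m : Int)) ≠ j := by omega
      push_cast
      omega

theorem bScan_up_none (road : List Int) (t : Int) :
    ∀ (k : Nat) (u : List Bool) (j : Int),
    ¬ (∀ s : Nat, s < k → Qu road u t j s) →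
    bScan road u t j 1 k = none := by
  intro k
  induction k with
  | zero => intro u j h; exact absurd (fun s hs => absurd hs (by omega)) h
  | succ k ih =>
    intro u j h
    rw [bScan]
    by_cases h0 : Qu road u t j 0
    · have h0' := h0
      unfold Qu at h0'
      push_cast at h0'
      simp only [add_zero] at h0'
      obtain ⟨h1, h2, h3, h4⟩ := h0'
      rw [if_neg (by push_neg; exact ⟨by omega, by omega, by rw [h3]; exact Bool.false_ne_true, h4⟩)]
      apply ih
      intro hc
      apply h
      intro s hs
      match s with
      | 0 => exact h0
      | s + 1 =>
        have hq := hc s (by omega)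
        unfold Qu at hq ⊢
        have e1 : j + 1 + (s : Int) = j + ((s + 1 : Nat) : Int) := by push_cast; ring
        rw [e1] at hq
        obtain ⟨q1, q2, q3, q4⟩ := hq
        rw [getD_set_ne u j.toNat ((j + ((s + 1 : Nat) : Int)).toNat) (by omega)] at q3
        exact ⟨q1, q2, q3, q4⟩
    · rw [if_pos]
      by_cases c1 : j < 0
      · exact Or.inl c1
      · by_cases c2 : (road.length : Int) ≤ j
        · exact Or.inr (Or.inl c2)
        · by_cases c3 : u.getD j.toNat false = true
          · exact Or.inr (Or.inr (Or.inl c3))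
          · refine Or.inr (Or.inr (Or.inr ?_))
            intro hc
            apply h0
            unfold Qu
            push_cast
            simp only [add_zero]
            exact ⟨by omega, by omega, by simpa using c3, hc⟩

-- over a stretch of pairwise-equal cells B's sweep does nothing
theorem bLoop_skip (road : List Int) (L : Int) :
    ∀ (c : Nat) (fb : Nat) (u : List Bool) (i : Nat), i + c < road.length →
    (∀ s : Nat, s < c → road.getD (i + s) 0 = road.getD (i + s + 1) 0) →
    bLoop road L (fb + c) u i = bLoop road L fb u (i + c) := by
  intro c
  induction c with
  | zero => intro fb u i _ _; rfl
  | succ c ih =>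
    intro fb u i hb hp
    have h0 : road.getD i 0 = road.getD (i + 1) 0 := by simpa using hp 0 (by omega)
    have e0 : fb + (c + 1) = (fb + c) + 1 := by omega
    rw [e0, bLoop, if_pos (by omega), if_neg (by rw [h0, sub_self]; simp),
      if_neg (by rw [h0]; exact lt_irrefl _), if_neg (by rw [h0]; exact lt_irrefl _)]
    have e : i + (c + 1) = (i + 1) + c := by omega
    rw [e]
    apply ih fb u (i + 1) (by omega)
    intro s hs
    have := hp (s + 1) (by omega)
    have e2 : i + (s + 1) = i + 1 + s := by omega
    rw [e2] at this
    exact this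

-- pairwise equality propagates to equality with the first cell
theorem chain_eq (road : List Int) (r i : Nat)
    (h : ∀ s : Nat, s < r → road.getD (i + s) 0 = road.getD (i + s + 1) 0) :
    ∀ s : Nat, s ≤ r → road.getD (i + s) 0 = road.getD i 0 := by
  intro s
  induction s with
  | zero => intro _; rfl
  | succ s ihs => intro hs; exact ((h s (by omega)).symm).trans (ihs (by omega))

-- the simulation invariant: at alignment point idx, A's run counter len is exactly the maximal
-- unused equal run of u ending at idx, and no cell beyond idx is used
def SimInv (road : List Int) (u : List Bool) (idx len : Nat) : Prop :=
  u.length = road.length ∧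
  len ≤ idx + 1 ∧
  (∀ j : Nat, idx < j → u.getD j false = false) ∧
  (∀ j : Nat, idx < j + len → j ≤ idx → u.getD j false = false ∧ road.getD j 0 = road.getD idx 0) ∧
  (len ≤ idx → ¬ (u.getD (idx - len) false = false ∧ road.getD (idx - len) 0 = road.getD idx 0))

theorem main_sim (road : List Int) (L : Int) (hL : 1 ≤ L) :
    ∀ (fa fb idx len : Nat) (u : List Bool),
    road.length ≤ idx + fa → road.length ≤ idx + fb → SimInv road u idx len →
    aLoop road L fa idx (len : Int) = bLoop road L fb u idx := by
  intro fa
  induction fa with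
  | zero =>
    intro fb idx len u hfa hfb _
    match fb with
    | 0 => rfl
    | fb + 1 => rw [aLoop, bLoop, if_neg (by omega)]
  | succ fa ih =>
    intro fb idx len u hfa hfb hinv
    obtain ⟨hlen, hrange, hfree, hrun, hblock⟩ := hinv
    match fb with
    | 0 =>
      rw [aLoop, bLoop, if_neg (by omega : ¬ ((idx : Int) < (road.length : Int) - 1))]
    | fb + 1 =>
    by_cases hg : idx + 1 < road.length
    case neg => rw [aLoop, bLoop, if_neg (by omega), if_neg (by omega)]
    case pos =>
    rw [aLoop, bLoop, if_pos (by omega : (idx : Int) < (road.length : Int) - 1), if_pos hg]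
    by_cases habs : (road.getD idx 0 - road.getD (idx + 1) 0).natAbs > 1
    · rw [if_pos habs, if_pos habs]
    rw [if_neg habs, if_neg habs]
    by_cases heq : road.getD idx 0 = road.getD (idx + 1) 0
    · -- flat step
      rw [if_pos heq, if_neg (by omega), if_neg (by omega)]
      have ecast : ((len : Int) + 1) = (((len + 1 : Nat)) : Int) := by push_cast; ring
      rw [ecast]
      apply ih fb (idx + 1) (len + 1) u (by omega) (by omega)
      refine ⟨hlen, by omega, fun j hj => hfree j (by omega), ?_, ?_⟩
      · intro j h1 h2
        rcases Nat.lt_or_ge j (idx + 1) with hj | hj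
        · have hr := hrun j (by omega) (by omega)
          exact ⟨hr.1, by rw [hr.2, heq]⟩
        · have hj' : j = idx + 1 := by omega
          subst hj'
          exact ⟨hfree _ (by omega), rfl⟩
      · intro hle
        have e2 : idx + 1 - (len + 1) = idx - len := by omega
        rw [e2]
        intro hcon
        exact hblock (by omega) ⟨hcon.1, by rw [hcon.2, heq]⟩
    · by_cases hup : road.getD idx 0 = road.getD (idx + 1) 0 - 1
      · -- ascent
        rw [if_neg heq, if_pos hup, if_pos (by omega : road.getD idx 0 < road.getD (idx + 1) 0)]
        by_cases hLlen : (len : Int) ≥ L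
        · rw [if_pos hLlen]
          have hcond : ∀ s : Nat, s < L.toNat → Qd road u (road.getD idx 0) (idx : Int) s := by
            intro s hs
            have hsl : s < len := by omega
            unfold Qd
            have e : ((idx : Int) - (s : Int)).toNat = idx - s := by omega
            rw [e]
            have hr := hrun (idx - s) (by omega) (by omega)
            refine ⟨by omega, by omega, hr.1, hr.2⟩
          obtain ⟨u', hsome, hl, hm'⟩ :=
            bScan_down_some road (road.getD idx 0) L.toNat u (idx : Int) hlen hcond
          rw [hsome]
          show aLoop road L fa (idx + 1) (((1 : Nat)) : Int) = bLoop road L fb u' (idx + 1)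
          apply ih fb (idx + 1) 1 u' (by omega) (by omega)
          refine ⟨hl.trans hlen, by omega, ?_, ?_, ?_⟩
          · intro j hj
            rw [hm' j]
            have hd : ¬ ((idx : Int) - (L.toNat : Int) < (j : Int) ∧ (j : Int) ≤ (idx : Int)) := by
              omega
            rw [decide_eq_false hd, Bool.false_or]
            exact hfree j (by omega)
          · intro j h1 h2
            have hj' : j = idx + 1 := by omega
            subst hj'
            refine ⟨?_, rfl⟩
            rw [hm' (idx + 1)]
            have hd : ¬ ((idx : Int) - (L.toNat : Int) < ((idx + 1 : Nat) : Int) ∧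
                ((idx + 1 : Nat) : Int) ≤ (idx : Int)) := by push_cast; omega
            rw [decide_eq_false hd, Bool.false_or]
            exact hfree (idx + 1) (by omega)
          · intro _
            have e2 : idx + 1 - 1 = idx := by omega
            rw [e2]
            intro hcon
            have hd : ((idx : Int) - (L.toNat : Int) < (idx : Int) ∧ (idx : Int) ≤ (idx : Int)) := by
              omega
            rw [hm' idx, decide_eq_true hd, Bool.true_or] at hcon
            exact absurd hcon.1 (by simp)
        · rw [if_neg hLlen]
          have hnone : bScan road u (road.getD idx 0) (idx : Int) (-1) L.toNat = none := by
            apply bScan_down_none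
            intro hall
            have hlt : len < L.toNat := by omega
            have hq := hall len hlt
            unfold Qd at hq
            obtain ⟨c1, c2, c3, c4⟩ := hq
            have hle : len ≤ idx := by omega
            have e : ((idx : Int) - (len : Int)).toNat = idx - len := by omega
            rw [e] at c3 c4
            exact hblock hle ⟨c3, c4⟩
          rw [hnone]
      · -- descent
        have hdown : road.getD idx 0 = road.getD (idx + 1) 0 + 1 := by omega
        rw [if_neg heq, if_neg hup, if_neg (by omega : ¬ road.getD idx 0 < road.getD (idx + 1) 0),
          if_pos (by omega : road.getD (idx + 1) 0 < road.getD idx 0)]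
        have hr1 : (1 : Int) = L - ((L - 1).toNat : Int) := by omega
        have hk : L.toNat = (L - 1).toNat + 1 := by omega
        split
        next idx' hA =>
          rw [aInner_spec road L ((L - 1).toNat) (idx + 1) 1 (road.length + 1) hr1 (by omega)] at hA
          push_cast at hA
          by_cases hC : (∀ s : Nat, s < (L - 1).toNat → ((idx + 1 + s : Int) < (road.length : Int) - 1 ∧
              road.getD (idx + 1 + s) 0 = road.getD (idx + 1 + s + 1) 0))
          case neg => rw [if_neg hC] at hA; cases hA
          case pos =>
          rw [if_pos hC] at hA
          have hidx' : idx' = idx + 1 + (L - 1).toNat := by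
            have := hA; injection this with h; omega
          subst hidx'
          have hbound : ∀ s : Nat, s ≤ (L - 1).toNat → idx + 1 + s < road.length := by
            intro s hs
            match s with
            | 0 => omega
            | s + 1 =>
              have := (hC s (by omega)).1
              push_cast at this
              omega
          have hcond : ∀ s : Nat, s < L.toNat →
              Qu road u (road.getD (idx + 1) 0) ((idx : Int) + 1) s := by
            intro s hs
            unfold Qu
            have e : ((idx : Int) + 1 + (s : Int)).toNat = idx + 1 + s := by omega
            rw [e]
            have hsr : s ≤ (L - 1).toNat := by omega
            refine ⟨by omega, by have hb2 := hbound s hsr; omega, hfree _ (by omega), ?_⟩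
            have := chain_eq road ((L - 1).toNat) (idx + 1) (fun t ht => (hC t ht).2) s hsr
            exact this
          obtain ⟨u', hsome, hl, hm'⟩ :=
            bScan_up_some road (road.getD (idx + 1) 0) L.toNat u ((idx : Int) + 1) hlen hcond
          rw [hsome]
          show aLoop road L fa (idx + 1 + (L - 1).toNat) (((0 : Nat)) : Int) = bLoop road L fb u' (idx + 1)
          have hbr := hbound ((L - 1).toNat) (by omega)
          have efb : fb = (fb - (L - 1).toNat) + (L - 1).toNat := by omega
          rw [efb, bLoop_skip road L ((L - 1).toNat) (fb - (L - 1).toNat) u' (idx + 1) (by omega)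
            (fun s hs => (hC s hs).2)]
          apply ih (fb - (L - 1).toNat) (idx + 1 + (L - 1).toNat) 0 u' (by omega) (by omega)
          refine ⟨hl.trans hlen, by omega, ?_, ?_, ?_⟩
          · intro j hj
            rw [hm' j]
            have hd : ¬ ((idx : Int) + 1 ≤ (j : Int) ∧ (j : Int) < (idx : Int) + 1 + (L.toNat : Int)) := by
              omega
            rw [decide_eq_false hd, Bool.false_or]
            exact hfree j (by omega)
          · intro j h1 h2
            exact absurd h1 (by omega)
          · intro _
            have e2 : idx + 1 + (L - 1).toNat - 0 = idx + 1 + (L - 1).toNat := by omega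
            rw [e2]
            intro hcon
            have hd : ((idx : Int) + 1 ≤ ((idx + 1 + (L - 1).toNat : Nat) : Int) ∧
                ((idx + 1 + (L - 1).toNat : Nat) : Int) < (idx : Int) + 1 + (L.toNat : Int)) := by
              push_cast; omega
            rw [hm' (idx + 1 + (L - 1).toNat), decide_eq_true hd, Bool.true_or] at hcon
            exact absurd hcon.1 (by simp)
        next hA =>
          rw [aInner_spec road L ((L - 1).toNat) (idx + 1) 1 (road.length + 1) hr1 (by omega)] at hA
          push_cast at hA
          by_cases hC : (∀ s : Nat, s < (L - 1).toNat → ((idx + 1 + s : Int) < (road.length : Int) - 1 ∧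
              road.getD (idx + 1 + s) 0 = road.getD (idx + 1 + s + 1) 0))
          case pos => rw [if_pos hC] at hA; cases hA
          case neg =>
          have hnone : bScan road u (road.getD (idx + 1) 0) ((idx : Int) + 1) 1 L.toNat = none := by
            apply bScan_up_none
            intro hall
            apply hC
            intro s hs
            have hq1 := hall s (by omega)
            have hq2 := hall (s + 1) (by omega)
            unfold Qu at hq1 hq2
            have e1 : ((idx : Int) + 1 + (s : Int)).toNat = idx + 1 + s := by omega
            have e2 : ((idx : Int) + 1 + ((s + 1 : Nat) : Int)).toNat = idx + 1 + s + 1 := by omega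
            rw [e1] at hq1
            rw [e2] at hq2
            refine ⟨by push_cast at hq2 ⊢; omega, ?_⟩
            rw [hq1.2.2.2, hq2.2.2.2]
          rw [hnone]

-- ===== VERDICT (by name: the statement is the Claim_ definition above) =====
theorem install_slope_spec : Claim_equal_install_slope := by
  unfold Claim_equal_install_slope
  intro road L _ hPre
  unfold Spec_install_slope install_slope install_slope_alt
  have h1 : ((1 : Nat) : Int) = (1 : Int) := rfl
  rw [← h1]
  apply main_sim road L hPre (road.length + 1) (road.length + 1) 0 1 _ (by omega) (by omega)
  refine ⟨by simp, by omega, fun j _ => getD_replicate _ _, ?_, by omega⟩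
  intro j h1 h2
  have hj : j = 0 := by omega
  subst hj
  exact ⟨getD_replicate _ _, rfl⟩
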